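-- pv_equiv track=rewrite | github.com/dnxnf/Meachine-Learning-New | Leetcodes/leetcode/editor/cn/[LCS 01]下载插件.py | leastMinutes1
-- ===== SOURCE A (Python) =====
-- def leastMinutes1(n: int) -> int:
--     if n == 1:
--         return 1
--     if n == 2:
--         return 2
--     if n == 3:
--         return 3
--     if n == 4:
--         return 3
--     res = 1
--     ans = 0
--     # 能翻倍就一直翻倍，直到翻倍后大于等于n
--     while res < n:
--         res *= 2
--         ans += 1
--     return ans + 1
-- ===== SOURCE B (Python) =====
-- def leastMinutes1(n: int) -> int:
--     if n <= 1:
--         return 1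
--     return (n - 1).bit_length() + 1
-- ===== Notes on version B (the rewrite author's own statement) =====
-- stated objective: simpler
-- what changed: Replaces the doubling while-loop and the redundant special-case branches with the closed form (n-1).bit_length()+1 guarded by n<=1, which equals ceil(log2 n)+1 for n>=2.
import Mathlib
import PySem

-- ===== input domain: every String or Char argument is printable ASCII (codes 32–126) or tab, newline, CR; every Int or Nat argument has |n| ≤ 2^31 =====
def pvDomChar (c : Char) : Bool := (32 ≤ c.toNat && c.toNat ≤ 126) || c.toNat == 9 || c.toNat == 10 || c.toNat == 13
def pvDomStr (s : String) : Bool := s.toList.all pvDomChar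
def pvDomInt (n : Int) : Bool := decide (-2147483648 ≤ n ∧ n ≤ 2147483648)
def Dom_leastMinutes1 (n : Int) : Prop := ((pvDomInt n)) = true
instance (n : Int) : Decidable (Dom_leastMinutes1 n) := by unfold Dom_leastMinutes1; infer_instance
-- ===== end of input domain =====

-- B: closed form ceil(log2 n)+1 via bit_length instead of A's doubling loop (objective: simpler).
-- ===== PORT A =====
-- the while loop: res doubles until res >= n; 0 < res is the loop invariant needed for termination
def leastMinutes1Loop (n res ans : Int) (h : 0 < res) : Int :=
  if res < n then leastMinutes1Loop n (res * 2) (ans + 1) (by omega) else ans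
termination_by (n - res).toNat
decreasing_by omega

def leastMinutes1 (n : Int) : Int :=
  if n = 1 then 1
  else if n = 2 then 2
  else if n = 3 then 3
  else if n = 4 then 3
  else leastMinutes1Loop n 1 0 (by omega) + 1

-- ===== PORT B =====
-- (n-1).bit_length() for n ≥ 2 is Nat.log2 (n-1) + 1 (exact: n-1 ≥ 1 there)
def leastMinutes1_alt (n : Int) : Int :=
  if n ≤ 1 then 1
  else (((n - 1).toNat.log2 : Int) + 1) + 1

-- ===== PRECONDITION & SPEC =====
def Spec_leastMinutes1 (n : Int) (out : Int) : Prop := out = leastMinutes1_alt n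
instance (n : Int) (out : Int) : Decidable (Spec_leastMinutes1 n out) := by unfold Spec_leastMinutes1; infer_instance

-- ===== CLAIM (what is proved, stated in full; the proofs are below) =====
def Claim_equal_leastMinutes1 : Prop := ∀ (n : Int), Dom_leastMinutes1 n → Spec_leastMinutes1 n (leastMinutes1 n)

-- ===== LEMMAS AND PROOFS =====

-- ===== VERDICT (by name: the statement is the Claim_ definition above) =====-- counts the doublings of the loop
def countD (n res : Int) (h : 0 < res) : Nat :=
  if res < n then countD n (res * 2) (by omega) + 1 else 0
termination_by (n - res).toNat
decreasing_by omega

theorem loop_eq_countD (n res ans : Int) (h : 0 < res) :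
    leastMinutes1Loop n res ans h = ans + (countD n res h : Int) := by
  fun_induction countD n res h generalizing ans with
  | case1 res h hlt ih =>
      rw [leastMinutes1Loop, if_pos hlt, ih]
      push_cast; ring
  | case2 res h hlt =>
      rw [leastMinutes1Loop, if_neg hlt]
      simp

-- countD is the least c with n ≤ res * 2^c
theorem countD_min (n res : Int) (h : 0 < res) :
    n ≤ res * 2 ^ (countD n res h) ∧ ∀ c : Nat, n ≤ res * 2 ^ c → countD n res h ≤ c := by
  fun_induction countD n res h with
  | case1 res h hlt ih =>
      obtain ⟨h1, h2⟩ := ih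
      constructor
      · calc n ≤ res * 2 * 2 ^ (countD n (res * 2) (by omega)) := h1
          _ = res * 2 ^ (countD n (res * 2) (by omega) + 1) := by ring
      · intro c hc
        cases c with
        | zero => simp at hc; omega
        | succ c' =>
          have : n ≤ res * 2 * 2 ^ c' := by
            have : res * 2 ^ (c' + 1) = res * 2 * 2 ^ c' := by ring
            omega
          have := h2 c' this
          omega
  | case2 res h hlt =>
      refine ⟨by simpa using le_of_not_gt hlt, fun c _ => Nat.zero_le c⟩

theorem countD_one_eq (n : Int) (hn : 2 ≤ n) :
    (countD n 1 (by omega) : Int) = ((n - 1).toNat.log2 : Int) + 1 := by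
  obtain ⟨h1, h2⟩ := countD_min n 1 (by omega)
  set c := countD n 1 (by omega) with hc
  have hcpos : 1 ≤ c := by
    by_contra hlt
    have : c = 0 := by omega
    rw [this] at h1; simp at h1; omega
  -- 2^(c-1) < n : otherwise minimality gives c ≤ c-1
  have hlow : ¬ n ≤ 1 * 2 ^ (c - 1) := by
    intro hle
    have := h2 (c - 1) hle
    omega
  have hlow' : (2 : Int) ^ (c - 1) < n := by
    simpa using lt_of_not_ge fun hge => hlow (by simpa using hge)
  -- Nat.log2 (n-1).toNat = c - 1
  have hm : ((n - 1).toNat : Int) = n - 1 := by omega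
  have hub : (n - 1).toNat < 2 ^ c := by
    have : ((n - 1).toNat : Int) < (2 : Int) ^ c := by
      rw [hm]; simp at h1; omega
    exact_mod_cast this
  have hlb : 2 ^ (c - 1) ≤ (n - 1).toNat := by
    have : (2 : Int) ^ (c - 1) ≤ ((n - 1).toNat : Int) := by rw [hm]; omega
    exact_mod_cast this
  have hlog : (n - 1).toNat.log2 = c - 1 := by
    rw [Nat.log2_eq_log_two]
    refine Nat.log_eq_of_pow_le_of_lt_pow hlb ?_
    have : c - 1 + 1 = c := by omega
    rw [this]; exact hub
  rw [hlog]
  push_cast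
  omega

-- ===== VERDICT =====
theorem leastMinutes1_spec : Claim_equal_leastMinutes1 := by
  intro n _
  unfold Spec_leastMinutes1 leastMinutes1 leastMinutes1_alt
  by_cases h1 : n = 1
  · simp [h1]
  by_cases h2 : n = 2
  · subst h2; decide
  by_cases h3 : n = 3
  · subst h3; decide
  by_cases h4 : n = 4
  · subst h4; decide
  rw [if_neg h1, if_neg h2, if_neg h3, if_neg h4]
  by_cases hle : n ≤ 1
  · rw [if_pos hle, loop_eq_countD]
    have : countD n 1 (by omega) = 0 := by
      rw [countD, if_neg (by omega)]
    rw [this]; simp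
  · rw [if_neg hle, loop_eq_countD, countD_one_eq n (by omega)]
    ring
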